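-- pv_equiv track=rewrite | github.com/migostro/sistemas-de-biologia | vpl3/ListaVPL_03.py | listaAtivacao
-- ===== SOURCE A (Python) =====
-- import copy
--
-- def adicionaEstado(listaEstados, val):
--     n = len(listaEstados)
--     for j in range(n) :
--         # adiciona val no final da lista
--         listaEstados[j] += val
--
-- def esta(gene, func):
--     for i in range(len(func)):
--         if gene in func[i]:
--             return i
--     return -1
--
-- def estado(gene):
--     if '!' in gene:
--         return '0'
--     else:
--         return '1'
--
-- def estados(listaGenes, func):
--     listaEstados = ['']
--
--     for i in range(len(listaGenes)):
--
--         index = esta(listaGenes[i], func)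
--         #caso o gene tenha uma função definida
--         # adiciona a tabela apenas o estado possivel
--         if index != -1:
--             adicionaEstado(listaEstados, estado(func[index]))
--         # caso o gene não tenha função definida
--         # adiciona os dois estados (duplica a tabela)
--         else:
--             lista0 = copy.deepcopy(listaEstados)
--             lista1 = copy.deepcopy(listaEstados)
--
--             adicionaEstado(lista0, '0')
--             adicionaEstado(lista1, '1')
--
--             # duplica a lista
--             listaEstados = lista0 + lista1
--
--     return listaEstados
--
-- def listaAtivacao(listaGenes, func):
--     separadorFuncE = '&'
--
--     listaAtivacoes = []
--
--     # faz a tabela de cada gene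
--     for i in range(len(func)):
--         # estado parcial
--         estadoFunc = []
--
--         # j é cada função que tem apenas &
--         for j in func[i]:
--             estadosAux = estados(listaGenes, j.split(separadorFuncE))
--
--             # procura por estados que ainda não estão em estadosFunc
--             for k in estadosAux:
--                 if not k in estadoFunc:
--                     estadoFunc.append(k)
--         listaAtivacoes.append(estadoFunc)
--
--     return listaAtivacoes
-- ===== SOURCE B (Python) =====
-- def listaAtivacao(listaGenes, func):
--     separadorFuncE = '&'
--     listaAtivacoes = []
--     for regra in func:
--         estadoFunc = []
--         for j in regra:
--             clausulas = j.split(separadorFuncE)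
--             # classify each gene once: fixed bit ('0'/'1') from the first clause
--             # containing it, or None if free
--             spec = []
--             for gene in listaGenes:
--                 cl = next((c for c in clausulas if gene in c), None)
--                 spec.append(None if cl is None else ('0' if '!' in cl else '1'))
--             livres = spec.count(None)
--             # enumerate the free genes by a binary counter: the first free gene
--             # is the least-significant (fastest-varying) bit
--             for m in range(2 ** livres):
--                 chars = []
--                 mm = m
--                 for s in spec:
--                     if s is None:
--                         chars.append('01'[mm & 1])
--                         mm >>= 1
--                     else:
--                         chars.append(s)
--                 estadoStr = ''.join(chars)
--                 if estadoStr not in estadoFunc: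
--                     estadoFunc.append(estadoStr)
--         listaAtivacoes.append(estadoFunc)
--     return listaAtivacoes
-- ===== Notes on version B (the rewrite author's own statement) =====
-- stated objective: alternative
-- what changed: Replaces the deepcopy/table-doubling state enumeration (estados) by a single classification pass over the genes (fixed bit or free) followed by a binary-counter enumeration of the free genes (first free gene = least-significant bit), building each state string directly; the outer per-function loop and the order-preserving dedup are kept.
import Mathlib
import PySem

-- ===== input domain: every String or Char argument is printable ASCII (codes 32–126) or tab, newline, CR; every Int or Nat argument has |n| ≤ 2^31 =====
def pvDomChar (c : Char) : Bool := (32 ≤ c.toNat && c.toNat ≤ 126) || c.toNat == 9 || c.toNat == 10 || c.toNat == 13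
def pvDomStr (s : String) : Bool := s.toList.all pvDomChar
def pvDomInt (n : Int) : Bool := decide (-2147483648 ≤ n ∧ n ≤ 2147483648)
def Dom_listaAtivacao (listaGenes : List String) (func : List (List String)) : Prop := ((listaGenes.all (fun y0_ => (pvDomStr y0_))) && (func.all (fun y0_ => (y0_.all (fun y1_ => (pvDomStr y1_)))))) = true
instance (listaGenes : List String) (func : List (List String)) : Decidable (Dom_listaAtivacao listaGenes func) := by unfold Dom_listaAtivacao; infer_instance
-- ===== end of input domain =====

-- B replaces A's deepcopy/table-doubling enumeration of gene states by one
-- classification pass plus a binary-counter enumeration (objective: alternative).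
-- Python strings built by '+=' are represented as List Char in both ports and
-- converted to String only when placed into the final result.

-- ===== PORT A =====
def pvEstaAux (gene : String) : List String → Nat → Int
  | [], _ => -1
  | c :: rest, i => if PySem.Str.isIn gene c then (i : Int) else pvEstaAux gene rest (i + 1)

def esta (gene : String) (f : List String) : Int := pvEstaAux gene f 0

def adicionaEstado (listaEstados : List (List Char)) (val : List Char) : List (List Char) :=
  listaEstados.map (fun s => s ++ val)

def estado (gene : String) : List Char :=
  if PySem.Str.isIn "!" gene then ['0'] else ['1']

def estadosStep (f : List String) (L : List (List Char)) (g : String) : List (List Char) :=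
  let index := esta g f
  if index ≠ -1 then
    adicionaEstado L (estado (PySem.List.pyGetD f index ""))
  else
    let lista0 := adicionaEstado L ['0']
    let lista1 := adicionaEstado L ['1']
    lista0 ++ lista1

def estados (listaGenes : List String) (f : List String) : List (List Char) :=
  listaGenes.foldl (estadosStep f) [[]]

def listaAtivacao (listaGenes : List String) (func : List (List String)) : List (List String) :=
  (func.foldl (fun acc fi =>
    acc ++ [fi.foldl (fun ef j =>
      (estados listaGenes ((PySem.Str.split? j "&").getD [])).foldl
        (fun ef2 k => if k ∈ ef2 then ef2 else ef2 ++ [k]) ef) []]) []).map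
    (fun ef => ef.map String.ofList)

-- ===== PORT B =====
def classify (clausulas : List String) (gene : String) : Option Char :=
  match clausulas.find? (fun c => PySem.Str.isIn gene c) with
  | none => none
  | some cl => some (if PySem.Str.isIn "!" cl then '0' else '1')

def buildChars : List (Option Char) → Nat → List Char
  | [], _ => []
  | some c :: rest, m => c :: buildChars rest m
  | none :: rest, m => (if m % 2 = 1 then '1' else '0') :: buildChars rest (m / 2)

def estadosAlt (listaGenes : List String) (clausulas : List String) : List (List Char) :=
  let spec := listaGenes.map (classify clausulas)
  (List.range (2 ^ spec.count none)).map (buildChars spec)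

def listaAtivacao_alt (listaGenes : List String) (func : List (List String)) : List (List String) :=
  (func.foldl (fun acc regra =>
    acc ++ [regra.foldl (fun ef j =>
      (estadosAlt listaGenes ((PySem.Str.split? j "&").getD [])).foldl
        (fun ef2 s => if s ∈ ef2 then ef2 else ef2 ++ [s]) ef) []]) []).map
    (fun ef => ef.map String.ofList)

-- ===== PRECONDITION & SPEC =====
def Spec_listaAtivacao (listaGenes : List String) (func : List (List String)) (out : List (List String)) : Prop := out = listaAtivacao_alt listaGenes func
instance (listaGenes : List String) (func : List (List String)) (out : List (List String)) : Decidable (Spec_listaAtivacao listaGenes func out) := by unfold Spec_listaAtivacao; infer_instance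

-- ===== CLAIM (what is proved, stated in full; the proofs are below) =====
def Claim_equal_listaAtivacao : Prop := ∀ (listaGenes : List String) (func : List (List String)), Dom_listaAtivacao listaGenes func → Spec_listaAtivacao listaGenes func (listaAtivacao listaGenes func)

-- ===== LEMMAS AND PROOFS =====

theorem pvEstaAux_succ (g : String) (f : List String) (i : Nat) :
    pvEstaAux g f (i + 1) = if pvEstaAux g f i = -1 then -1 else pvEstaAux g f i + 1 := by
  induction f generalizing i with
  | nil => simp [pvEstaAux]
  | cons c rest ih =>
    by_cases h : PySem.Str.isIn g c = true
    · have h1 : pvEstaAux g (c :: rest) (i + 1) = ((i + 1 : Nat) : Int) := by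
        simp only [pvEstaAux, if_pos h]
      have h2 : pvEstaAux g (c :: rest) i = (i : Int) := by
        simp only [pvEstaAux, if_pos h]
      rw [h1, h2, if_neg (by omega)]
      push_cast; ring
    · have h1 : pvEstaAux g (c :: rest) (i + 1) = pvEstaAux g rest (i + 1 + 1) := by
        simp only [pvEstaAux, if_neg h]
      have h2 : pvEstaAux g (c :: rest) i = pvEstaAux g rest (i + 1) := by
        simp only [pvEstaAux, if_neg h]
      rw [h1, h2, ih]

theorem esta_spec (g : String) (f : List String) :
    (f.find? (fun c => PySem.Str.isIn g c) = none ∧ esta g f = -1) ∨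
    (∃ (cl : String) (n : Nat), f.find? (fun c => PySem.Str.isIn g c) = some cl ∧
      esta g f = (n : Int) ∧ f.getD n "" = cl) := by
  induction f with
  | nil => left; exact ⟨rfl, rfl⟩
  | cons c rest ih =>
    by_cases h : PySem.Str.isIn g c = true
    · right
      refine ⟨c, 0, List.find?_cons_of_pos h, ?_, rfl⟩
      simp only [esta, pvEstaAux, if_pos h]
    · have hstep : esta g (c :: rest) = if esta g rest = -1 then -1 else esta g rest + 1 := by
        have h0 : esta g (c :: rest) = pvEstaAux g rest (0 + 1) := by
          simp only [esta, pvEstaAux, if_neg h]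
        rw [h0, pvEstaAux_succ g rest 0]
        rfl
      rcases ih with ⟨hf, he⟩ | ⟨cl, n, hf, he, hg⟩
      · left
        exact ⟨by rw [List.find?_cons_of_neg h, hf], by simp [hstep, he]⟩
      · right
        refine ⟨cl, n + 1, by rw [List.find?_cons_of_neg h, hf], ?_, by simpa using hg⟩
        rw [hstep, he, if_neg (by omega)]
        push_cast; ring

theorem step_classify_none (f : List String) (L : List (List Char)) (g : String)
    (hc : classify f g = none) :
    estadosStep f L g = L.map (fun s => s ++ ['0']) ++ L.map (fun s => s ++ ['1']) := by
  rcases esta_spec g f with ⟨hf, he⟩ | ⟨cl, n, hf, he, hg⟩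
  · simp [estadosStep, he, adicionaEstado]
  · unfold classify at hc
    rw [hf] at hc
    simp at hc

theorem step_classify_some (f : List String) (L : List (List Char)) (g : String) (c : Char)
    (hc : classify f g = some c) :
    estadosStep f L g = L.map (fun s => s ++ [c]) := by
  rcases esta_spec g f with ⟨hf, he⟩ | ⟨cl, n, hf, he, hg⟩
  · unfold classify at hc
    rw [hf] at hc
    simp at hc
  · have hne : (n : Int) ≠ -1 := by omega
    have hget : PySem.List.pyGetD f ((n : Int)) "" = cl := by simpa using hg
    have hcv : c = if PySem.Str.isIn "!" cl = true then '0' else '1' := by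
      unfold classify at hc
      rw [hf] at hc
      simp only [] at hc
      exact (Option.some.inj hc).symm
    have hest : estado cl = [c] := by
      rw [hcv]
      unfold estado
      by_cases hb : PySem.Str.isIn "!" cl = true
      · rw [if_pos hb, if_pos hb]
      · rw [if_neg hb, if_neg hb]
    simp only [estadosStep, he, ne_eq, hne, not_false_eq_true, if_true, hget, hest,
      adicionaEstado]

theorem range_two_mul_map {α : Type} (f : Nat → α) (n : Nat) :
    (List.range (2 * n)).map f = (List.range n).flatMap (fun i => [f (2 * i), f (2 * i + 1)]) := by
  induction n with
  | zero => simp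
  | succ n ih =>
    have h : 2 * (n + 1) = (2 * n) + 1 + 1 := by ring
    rw [h, List.range_succ, List.range_succ, List.range_succ]
    simp [ih]

theorem buildChars_some (c : Char) (rest : List (Option Char)) (m : Nat) :
    buildChars (some c :: rest) m = c :: buildChars rest m := rfl

theorem buildChars_none_even (rest : List (Option Char)) (i : Nat) :
    buildChars (none :: rest) (2 * i) = '0' :: buildChars rest i := by
  have h1 : ¬ (2 * i % 2 = 1) := by omega
  have h2 : 2 * i / 2 = i := by omega
  simp only [buildChars, if_neg h1, h2]

theorem buildChars_none_odd (rest : List (Option Char)) (i : Nat) :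
    buildChars (none :: rest) (2 * i + 1) = '1' :: buildChars rest i := by
  have h1 : (2 * i + 1) % 2 = 1 := by omega
  have h2 : (2 * i + 1) / 2 = i := by omega
  simp only [buildChars, if_pos h1, h2]

theorem estados_foldl (f : List String) (genes : List String) (L : List (List Char)) :
    List.foldl (estadosStep f) L genes
      = ((List.range (2 ^ ((genes.map (classify f)).count none))).map
          (buildChars (genes.map (classify f)))).flatMap (fun s => L.map (fun p => p ++ s)) := by
  induction genes generalizing L with
  | nil => simp [buildChars]
  | cons g gs ih =>
    rw [List.foldl_cons]
    cases hc : classify f g with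
    | some c =>
      rw [step_classify_some f L g c hc, ih]
      have hcount : List.count none (some c :: gs.map (classify f))
          = List.count none (gs.map (classify f)) := by simp
      rw [List.map_cons, hc, hcount, List.flatMap_map, List.flatMap_map]
      refine List.flatMap_congr (fun m _ => ?_)
      rw [buildChars_some, List.map_map]
      refine List.map_congr_left (fun p _ => ?_)
      simp
    | none =>
      rw [step_classify_none f L g hc, ih]
      have hcount : List.count none (none :: gs.map (classify f))
          = List.count none (gs.map (classify f)) + 1 := by simp
      rw [List.map_cons, hc, hcount, pow_succ,
        show (2 ^ List.count none (gs.map (classify f)) * 2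
          = 2 * 2 ^ List.count none (gs.map (classify f))) from by ring,
        range_two_mul_map, List.flatMap_map]
      rw [List.flatMap_assoc]
      refine List.flatMap_congr (fun m _ => ?_)
      rw [buildChars_none_even, buildChars_none_odd]
      simp [Function.comp_def, List.append_assoc]

theorem estados_eq (lg f : List String) : estados lg f = estadosAlt lg f := by
  unfold estados estadosAlt
  rw [estados_foldl]
  simp

-- ===== VERDICT (by name: the statement is the Claim_ definition above) =====
theorem listaAtivacao_spec : Claim_equal_listaAtivacao := by
  intro lg func _
  unfold Spec_listaAtivacao listaAtivacao listaAtivacao_alt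
  simp only [estados_eq]
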